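-- pv_equiv track=rewrite | github.com/newfull5/Programmers | 삼각 달팽이.py | solution
-- ===== SOURCE A (Python) =====
-- def solution(n):
--     answer = [[0]*i for i in range(1, n+1)]
--     cnt = 1
--     x = 0
--     y = 0
--     direction = 'd'
--
--     for num in range(n, 0, -1):
--         for i in range(num):
--             answer[x][y] = cnt
--             cnt += 1
--
--             if i == num-1:
--                 if direction == 'd':
--                     direction = 'r'
--                 elif direction == 'r':
--                     direction = 'u'
--                 elif direction == 'u':
--                     direction = 'd'
--
--             if direction == 'd':
--                 x +=1
--             elif direction == 'r':
--                 y += 1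
--             elif direction == 'u':
--                 x -= 1
--                 y -= 1
--
--
--     return sum(answer, [])
-- ===== SOURCE B (Python) =====
-- def solution(n):
--     answer = [[0] * i for i in range(1, n + 1)]
--     cnt = 1
--     j = 0
--     for m in range(n, 0, -3):
--         x, y = 2 * j, j
--         for i in range(m):              # left edge, downward
--             answer[x + i][y] = cnt
--             cnt += 1
--         for i in range(m - 1):          # bottom edge, rightward
--             answer[x + m - 1][y + 1 + i] = cnt
--             cnt += 1
--         for i in range(m - 2):          # diagonal, upward
--             answer[x + m - 2 - i][y + m - 2 - i] = cnt
--             cnt += 1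
--         j += 1
--     return [v for row in answer for v in row]
-- ===== Notes on version B (the rewrite author's own statement) =====
-- stated objective: alternative
-- what changed: Replaces A's cell-by-cell direction automaton (state machine turning d->r->u) with ring-by-ring filling: for each ring of side m = n, n-3, n-6, ... the three edges (left edge down, bottom edge right, diagonal up) are filled by explicit range loops at arithmetically computed (row, col) coordinates.
import Mathlib
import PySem

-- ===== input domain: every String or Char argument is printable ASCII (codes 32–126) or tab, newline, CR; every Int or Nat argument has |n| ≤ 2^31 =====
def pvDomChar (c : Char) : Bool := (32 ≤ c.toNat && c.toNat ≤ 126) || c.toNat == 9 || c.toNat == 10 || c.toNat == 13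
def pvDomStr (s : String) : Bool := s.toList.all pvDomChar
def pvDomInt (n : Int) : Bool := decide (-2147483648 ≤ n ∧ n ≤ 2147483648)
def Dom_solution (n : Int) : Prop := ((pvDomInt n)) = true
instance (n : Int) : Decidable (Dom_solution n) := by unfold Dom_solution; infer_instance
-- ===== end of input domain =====

-- B fills the triangle ring by ring with three explicit edge loops and arithmetic coordinates
-- instead of A's cell-by-cell direction automaton (objective: alternative decomposition, same cost).

-- ===== PORT A =====
-- answer[x][y] = v  (both Pythons do this write; indices are always in range during execution)
def set2 (a : List (List Int)) (x y v : Int) : List (List Int) :=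
  PySem.List.pySetD a x (PySem.List.pySetD (PySem.List.pyGetD a x []) y v)

-- the body of A's inner loop: write, bump cnt, maybe turn at the segment end, then move
def stepA (num : Int) (s : List (List Int) × Int × Int × Int × Char) (i : Int) :
    List (List Int) × Int × Int × Int × Char :=
  match s with
  | (ans, cnt, x, y, d) =>
    let ans := set2 ans x y cnt
    let cnt := cnt + 1
    let d := if i == num - 1 then
               (if d == 'd' then 'r' else if d == 'r' then 'u' else if d == 'u' then 'd' else d)
             else d
    if d == 'd' then (ans, cnt, x + 1, y, d)
    else if d == 'r' then (ans, cnt, x, y + 1, d)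
    else if d == 'u' then (ans, cnt, x - 1, y - 1, d)
    else (ans, cnt, x, y, d)

def solution (n : Int) : List Int :=
  let answer := (PySem.List.pyRange 1 (n + 1) 1).map (fun i => List.replicate i.toNat (0 : Int))
  let fin := (PySem.List.pyRange n 0 (-1)).foldl
      (fun s num => (PySem.List.pyRange 0 num 1).foldl (stepA num) s)
      (answer, 1, 0, 0, 'd')
  fin.1.foldl (· ++ ·) []

-- ===== PORT B =====
-- one ring: left edge downward, bottom edge rightward, diagonal upward
def ringB (s : List (List Int) × Int × Int) (m : Int) : List (List Int) × Int × Int :=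
  match s with
  | (ans, cnt, j) =>
    let x := 2 * j
    let y := j
    let s1 := (PySem.List.pyRange 0 m 1).foldl
        (fun t i => (set2 t.1 (x + i) y t.2, t.2 + 1)) (ans, cnt)
    let s2 := (PySem.List.pyRange 0 (m - 1) 1).foldl
        (fun t i => (set2 t.1 (x + m - 1) (y + 1 + i) t.2, t.2 + 1)) s1
    let s3 := (PySem.List.pyRange 0 (m - 2) 1).foldl
        (fun t i => (set2 t.1 (x + m - 2 - i) (y + m - 2 - i) t.2, t.2 + 1)) s2
    (s3.1, s3.2, j + 1)

def solution_alt (n : Int) : List Int :=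
  let answer := (PySem.List.pyRange 1 (n + 1) 1).map (fun i => List.replicate i.toNat (0 : Int))
  let fin := (PySem.List.pyRange n 0 (-3)).foldl ringB (answer, 1, 0)
  fin.1.flatten

-- ===== PRECONDITION & SPEC =====
def Spec_solution (n : Int) (out : List Int) : Prop := out = solution_alt n
instance (n : Int) (out : List Int) : Decidable (Spec_solution n out) := by unfold Spec_solution; infer_instance

-- ===== CLAIM (what is proved, stated in full; the proofs are below) =====
def Claim_equal_solution : Prop := ∀ (n : Int), Dom_solution n → Spec_solution n (solution n)

-- ===== LEMMAS AND PROOFS =====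

-- a run of k writes going down a column / right along a row / up a diagonal
def writeCol (a : List (List Int)) (cnt x y : Int) : Nat → List (List Int)
  | 0 => a
  | k + 1 => writeCol (set2 a x y cnt) (cnt + 1) (x + 1) y k

def writeRow (a : List (List Int)) (cnt x y : Int) : Nat → List (List Int)
  | 0 => a
  | k + 1 => writeRow (set2 a x y cnt) (cnt + 1) x (y + 1) k

def writeDiag (a : List (List Int)) (cnt x y : Int) : Nat → List (List Int)
  | 0 => a
  | k + 1 => writeDiag (set2 a x y cnt) (cnt + 1) (x - 1) (y - 1) k

theorem writeCol_succ_right (k : Nat) : ∀ a cnt x y,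
    writeCol a cnt x y (k + 1) = set2 (writeCol a cnt x y k) (x + k) y (cnt + k) := by
  induction k with
  | zero => intro a cnt x y; simp [writeCol]
  | succ k ih =>
    intro a cnt x y
    show writeCol (set2 a x y cnt) (cnt + 1) (x + 1) y (k + 1) = _
    rw [ih]
    simp [writeCol]
    ring_nf

theorem writeRow_succ_right (k : Nat) : ∀ a cnt x y,
    writeRow a cnt x y (k + 1) = set2 (writeRow a cnt x y k) x (y + k) (cnt + k) := by
  induction k with
  | zero => intro a cnt x y; simp [writeRow]
  | succ k ih =>
    intro a cnt x y
    show writeRow (set2 a x y cnt) (cnt + 1) x (y + 1) (k + 1) = _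
    rw [ih]
    simp [writeRow]
    ring_nf

theorem writeDiag_succ_right (k : Nat) : ∀ a cnt x y,
    writeDiag a cnt x y (k + 1) = set2 (writeDiag a cnt x y k) (x - k) (y - k) (cnt + k) := by
  induction k with
  | zero => intro a cnt x y; simp [writeDiag]
  | succ k ih =>
    intro a cnt x y
    show writeDiag (set2 a x y cnt) (cnt + 1) (x - 1) (y - 1) (k + 1) = _
    rw [ih]
    simp [writeDiag]
    ring_nf

-- A's inner loop before the last index: no turn, straight run
theorem foldD_prefix (l : List Int) (num : Int) (h : ∀ i ∈ l, i ≠ num - 1) :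
    ∀ ans cnt x y, l.foldl (stepA num) (ans, cnt, x, y, 'd')
      = (writeCol ans cnt x y l.length, cnt + l.length, x + l.length, y, 'd') := by
  induction l with
  | nil => intro ans cnt x y; simp [writeCol]
  | cons i l ih =>
    intro ans cnt x y
    have hi : (i == num - 1) = false := by
      simp only [beq_eq_false_iff_ne]; exact h i (List.mem_cons_self ..)
    have hstep : stepA num (ans, cnt, x, y, 'd') i = (set2 ans x y cnt, cnt + 1, x + 1, y, 'd') := by
      simp [stepA, hi]
    simp only [List.foldl_cons, hstep]
    rw [ih (fun j hj => h j (List.mem_cons_of_mem _ hj))]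
    simp [writeCol]
    all_goals omega

theorem foldR_prefix (l : List Int) (num : Int) (h : ∀ i ∈ l, i ≠ num - 1) :
    ∀ ans cnt x y, l.foldl (stepA num) (ans, cnt, x, y, 'r')
      = (writeRow ans cnt x y l.length, cnt + l.length, x, y + l.length, 'r') := by
  induction l with
  | nil => intro ans cnt x y; simp [writeRow]
  | cons i l ih =>
    intro ans cnt x y
    have hi : (i == num - 1) = false := by
      simp only [beq_eq_false_iff_ne]; exact h i (List.mem_cons_self ..)
    have hstep : stepA num (ans, cnt, x, y, 'r') i = (set2 ans x y cnt, cnt + 1, x, y + 1, 'r') := by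
      simp [stepA, hi]
    simp only [List.foldl_cons, hstep]
    rw [ih (fun j hj => h j (List.mem_cons_of_mem _ hj))]
    simp [writeRow]
    all_goals omega

theorem foldU_prefix (l : List Int) (num : Int) (h : ∀ i ∈ l, i ≠ num - 1) :
    ∀ ans cnt x y, l.foldl (stepA num) (ans, cnt, x, y, 'u')
      = (writeDiag ans cnt x y l.length, cnt + l.length, x - l.length, y - l.length, 'u') := by
  induction l with
  | nil => intro ans cnt x y; simp [writeDiag]
  | cons i l ih =>
    intro ans cnt x y
    have hi : (i == num - 1) = false := by
      simp only [beq_eq_false_iff_ne]; exact h i (List.mem_cons_self ..)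
    have hstep : stepA num (ans, cnt, x, y, 'u') i = (set2 ans x y cnt, cnt + 1, x - 1, y - 1, 'u') := by
      simp [stepA, hi]
    simp only [List.foldl_cons, hstep]
    rw [ih (fun j hj => h j (List.mem_cons_of_mem _ hj))]
    simp [writeDiag]
    all_goals omega

-- one whole segment of A, per incoming direction
theorem segD (num : Int) (h : 1 ≤ num) (ans cnt x y) :
    (PySem.List.pyRange 0 num 1).foldl (stepA num) (ans, cnt, x, y, 'd')
      = (writeCol ans cnt x y num.toNat, cnt + num, x + num - 1, y + 1, 'r') := by
  have h0 : (0 : Int) ≤ num - 1 := by omega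
  rw [PySem.List.pyRange_one_append 0 (num - 1) num h0 (by omega), List.foldl_append]
  rw [foldD_prefix _ num (by intro i hi; rw [PySem.List.mem_pyRange_one] at hi; omega)]
  have hsing : PySem.List.pyRange (num - 1) num 1 = [num - 1] := by
    have := PySem.List.pyRange_one_singleton (num - 1)
    rwa [show num - 1 + 1 = num from by omega] at this
  rw [hsing]
  have hlen : ((PySem.List.pyRange 0 (num - 1) 1).length : Int) = num - 1 := by
    rw [PySem.List.length_pyRange_one]; omega
  have hnum : num.toNat = (PySem.List.pyRange 0 (num - 1) 1).length + 1 := by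
    rw [PySem.List.length_pyRange_one]; omega
  rw [hnum, writeCol_succ_right]
  simp only [List.foldl_cons, List.foldl_nil, stepA, hlen]
  simp
  omega

theorem segR (num : Int) (h : 1 ≤ num) (ans cnt x y) :
    (PySem.List.pyRange 0 num 1).foldl (stepA num) (ans, cnt, x, y, 'r')
      = (writeRow ans cnt x y num.toNat, cnt + num, x - 1, y + num - 2, 'u') := by
  have h0 : (0 : Int) ≤ num - 1 := by omega
  rw [PySem.List.pyRange_one_append 0 (num - 1) num h0 (by omega), List.foldl_append]
  rw [foldR_prefix _ num (by intro i hi; rw [PySem.List.mem_pyRange_one] at hi; omega)]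
  have hsing : PySem.List.pyRange (num - 1) num 1 = [num - 1] := by
    have := PySem.List.pyRange_one_singleton (num - 1)
    rwa [show num - 1 + 1 = num from by omega] at this
  rw [hsing]
  have hlen : ((PySem.List.pyRange 0 (num - 1) 1).length : Int) = num - 1 := by
    rw [PySem.List.length_pyRange_one]; omega
  have hnum : num.toNat = (PySem.List.pyRange 0 (num - 1) 1).length + 1 := by
    rw [PySem.List.length_pyRange_one]; omega
  rw [hnum, writeRow_succ_right]
  simp only [List.foldl_cons, List.foldl_nil, stepA, hlen]
  simp
  omega

theorem segU (num : Int) (h : 1 ≤ num) (ans cnt x y) :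
    (PySem.List.pyRange 0 num 1).foldl (stepA num) (ans, cnt, x, y, 'u')
      = (writeDiag ans cnt x y num.toNat, cnt + num, x - num + 2, y - num + 1, 'd') := by
  have h0 : (0 : Int) ≤ num - 1 := by omega
  rw [PySem.List.pyRange_one_append 0 (num - 1) num h0 (by omega), List.foldl_append]
  rw [foldU_prefix _ num (by intro i hi; rw [PySem.List.mem_pyRange_one] at hi; omega)]
  have hsing : PySem.List.pyRange (num - 1) num 1 = [num - 1] := by
    have := PySem.List.pyRange_one_singleton (num - 1)
    rwa [show num - 1 + 1 = num from by omega] at this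
  rw [hsing]
  have hlen : ((PySem.List.pyRange 0 (num - 1) 1).length : Int) = num - 1 := by
    rw [PySem.List.length_pyRange_one]; omega
  have hnum : num.toNat = (PySem.List.pyRange 0 (num - 1) 1).length + 1 := by
    rw [PySem.List.length_pyRange_one]; omega
  rw [hnum, writeDiag_succ_right]
  simp only [List.foldl_cons, List.foldl_nil, stepA, hlen]
  simp
  omega

-- B's three edge loops are the same three runs
theorem edgeCol (k : Nat) : ∀ (a b : Int), b - a = k → ∀ ans cnt x y,
    (PySem.List.pyRange a b 1).foldl (fun t i => (set2 t.1 (x + i) y t.2, t.2 + 1)) (ans, cnt)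
      = (writeCol ans cnt (x + a) y k, cnt + k) := by
  induction k with
  | zero =>
    intro a b hab ans cnt x y
    rw [PySem.List.pyRange_one_eq_nil (by omega)]
    simp [writeCol]
  | succ k ih =>
    intro a b hab ans cnt x y
    rw [PySem.List.pyRange_one_cons (by omega), List.foldl_cons]
    rw [ih (a + 1) b (by omega)]
    show (writeCol (set2 ans (x + a) y cnt) (cnt + 1) (x + (a + 1)) y k, cnt + 1 + (k : Int)) = _
    rw [show x + (a + 1) = (x + a) + 1 from by ring]
    show (writeCol ans cnt (x + a) y (k + 1), _) = _
    push_cast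
    rw [show cnt + 1 + (k : Int) = cnt + ((k : Int) + 1) from by ring]

theorem edgeRow (k : Nat) : ∀ (a b : Int), b - a = k → ∀ ans cnt r c,
    (PySem.List.pyRange a b 1).foldl (fun t i => (set2 t.1 r (c + i) t.2, t.2 + 1)) (ans, cnt)
      = (writeRow ans cnt r (c + a) k, cnt + k) := by
  induction k with
  | zero =>
    intro a b hab ans cnt r c
    rw [PySem.List.pyRange_one_eq_nil (by omega)]
    simp [writeRow]
  | succ k ih =>
    intro a b hab ans cnt r c
    rw [PySem.List.pyRange_one_cons (by omega), List.foldl_cons]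
    rw [ih (a + 1) b (by omega)]
    show (writeRow (set2 ans r (c + a) cnt) (cnt + 1) r (c + (a + 1)) k, cnt + 1 + (k : Int)) = _
    rw [show c + (a + 1) = (c + a) + 1 from by ring]
    show (writeRow ans cnt r (c + a) (k + 1), _) = _
    push_cast
    rw [show cnt + 1 + (k : Int) = cnt + ((k : Int) + 1) from by ring]

theorem edgeDiag (k : Nat) : ∀ (a b : Int), b - a = k → ∀ ans cnt p q,
    (PySem.List.pyRange a b 1).foldl (fun t i => (set2 t.1 (p - i) (q - i) t.2, t.2 + 1)) (ans, cnt)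
      = (writeDiag ans cnt (p - a) (q - a) k, cnt + k) := by
  induction k with
  | zero =>
    intro a b hab ans cnt p q
    rw [PySem.List.pyRange_one_eq_nil (by omega)]
    simp [writeDiag]
  | succ k ih =>
    intro a b hab ans cnt p q
    rw [PySem.List.pyRange_one_cons (by omega), List.foldl_cons]
    rw [ih (a + 1) b (by omega)]
    show (writeDiag (set2 ans (p - a) (q - a) cnt) (cnt + 1) (p - (a + 1)) (q - (a + 1)) k,
        cnt + 1 + (k : Int)) = _
    rw [show p - (a + 1) = (p - a) - 1 from by ring, show q - (a + 1) = (q - a) - 1 from by ring]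
    show (writeDiag ans cnt (p - a) (q - a) (k + 1), _) = _
    push_cast
    rw [show cnt + 1 + (k : Int) = cnt + ((k : Int) + 1) from by ring]

-- range(a, 0, -3) induction forms
theorem pyRange_neg3_nil (a : Int) (h : a ≤ 0) : PySem.List.pyRange a 0 (-3) = [] := by
  simp only [PySem.List.pyRange]
  norm_num
  intro h2
  omega

theorem pyRange_neg3_cons (a : Int) (h : 0 < a) :
    PySem.List.pyRange a 0 (-3) = a :: PySem.List.pyRange (a - 3) 0 (-3) := by
  simp only [PySem.List.pyRange]
  norm_num
  rw [if_pos h]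
  by_cases h3 : 3 < a
  · rw [if_pos h3]
    have hc : ((a + 3 - 1) / 3).toNat = ((a - 1) / 3).toNat + 1 := by omega
    rw [hc, List.range_succ_eq_map]
    simp [Function.comp]
    intro k _
    ring
  · rw [if_neg h3]
    have h1 : ((a + 3 - 1) / 3).toNat = 1 := by omega
    rw [h1]
    simp

-- the main ring-by-ring correspondence
theorem main_rings (K : Nat) : ∀ (m : Int), m ≤ K → ∀ (j cnt : Int) (ans : List (List Int)),
    ((PySem.List.pyRange m 0 (-1)).foldl
        (fun s num => (PySem.List.pyRange 0 num 1).foldl (stepA num) s)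
        (ans, cnt, 2 * j, j, 'd')).1
      = ((PySem.List.pyRange m 0 (-3)).foldl ringB (ans, cnt, j)).1 := by
  induction K using Nat.strong_induction_on with
  | _ K ih =>
  intro m hm j cnt ans
  by_cases hm0 : m ≤ 0
  · rw [PySem.List.pyRange_neg_one_eq_nil hm0, pyRange_neg3_nil m hm0]
    rfl
  push Not at hm0
  rw [pyRange_neg3_cons m hm0, List.foldl_cons]
  by_cases hm1 : m = 1
  · subst hm1
    rw [PySem.List.pyRange_neg_one_cons (by norm_num : (0:Int) < 1)]
    rw [PySem.List.pyRange_neg_one_eq_nil (by norm_num : (1:Int) - 1 ≤ 0)]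
    rw [pyRange_neg3_nil (1 - 3) (by norm_num)]
    simp only [List.foldl_cons, List.foldl_nil]
    rw [segD 1 (le_refl 1) ans cnt (2 * j) j]
    simp only [ringB]
    rw [PySem.List.pyRange_one_eq_nil (show (1:Int) - 1 ≤ 0 by norm_num),
        PySem.List.pyRange_one_eq_nil (show (1:Int) - 2 ≤ 0 by norm_num)]
    rw [edgeCol 1 0 1 (by norm_num) ans cnt (2 * j) j]
    simp only [List.foldl_nil]
    norm_num
  by_cases hm2 : m = 2
  · subst hm2
    rw [PySem.List.pyRange_neg_one_cons (by norm_num : (0:Int) < 2)]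
    rw [show (2:Int) - 1 = 1 from by norm_num]
    rw [PySem.List.pyRange_neg_one_cons (by norm_num : (0:Int) < 1)]
    rw [PySem.List.pyRange_neg_one_eq_nil (by norm_num : (1:Int) - 1 ≤ 0)]
    rw [pyRange_neg3_nil (2 - 3) (by norm_num)]
    simp only [List.foldl_cons, List.foldl_nil]
    rw [segD 2 (by norm_num) ans cnt (2 * j) j]
    rw [segR 1 (le_refl 1) (writeCol ans cnt (2 * j) j (2:Int).toNat) (cnt + 2)
        (2 * j + 2 - 1) (j + 1)]
    simp only [ringB]
    rw [PySem.List.pyRange_one_eq_nil (show (2:Int) - 2 ≤ 0 by norm_num)]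
    rw [edgeCol 2 0 2 (by norm_num) ans cnt (2 * j) j]
    rw [show (2:Int) - 1 = 1 from by norm_num]
    rw [edgeRow 1 0 1 (by norm_num) (writeCol ans cnt (2 * j + 0) j 2) (cnt + (2:Nat))
        (2 * j + 2 - 1) (j + 1)]
    simp only [List.foldl_nil]
    norm_num
    rfl
  -- m ≥ 3
  have hm3 : 3 ≤ m := by omega
  -- A side: peel the three segments of the outer ring
  rw [PySem.List.pyRange_neg_one_cons (show (0:Int) < m by omega),
      PySem.List.pyRange_neg_one_cons (show (0:Int) < m - 1 by omega),
      PySem.List.pyRange_neg_one_cons (show (0:Int) < m - 1 - 1 by omega)]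
  rw [show m - 1 - 1 = m - 2 from by ring, show m - 2 - 1 = m - 3 from by ring]
  simp only [List.foldl_cons]
  rw [segD m (by omega) ans cnt (2 * j) j]
  rw [segR (m - 1) (by omega) (writeCol ans cnt (2 * j) j m.toNat) (cnt + m)
      (2 * j + m - 1) (j + 1)]
  rw [show 2 * j + m - 1 - 1 = 2 * j + m - 2 from by ring,
      show j + 1 + (m - 1) - 2 = j + m - 2 from by ring]
  rw [segU (m - 2) (by omega) (writeRow (writeCol ans cnt (2 * j) j m.toNat) (cnt + m)
      (2 * j + m - 1) (j + 1) (m - 1).toNat) (cnt + m + (m - 1)) (2 * j + m - 2) (j + m - 2)]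
  rw [show 2 * j + m - 2 - (m - 2) + 2 = 2 * (j + 1) from by ring,
      show j + m - 2 - (m - 2) + 1 = j + 1 from by ring]
  rw [ih (m - 3).toNat (by omega) (m - 3) (by omega) (j + 1) (cnt + m + (m - 1) + (m - 2))
      (writeDiag (writeRow (writeCol ans cnt (2 * j) j m.toNat) (cnt + m) (2 * j + m - 1)
        (j + 1) (m - 1).toNat) (cnt + m + (m - 1)) (2 * j + m - 2) (j + m - 2) (m - 2).toNat)]
  -- B side: the ring body is the same three runs
  have hBcol := edgeCol m.toNat 0 m (by omega) ans cnt (2 * j) j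
  rw [show 2 * j + 0 = 2 * j from by ring,
      show ((m.toNat : Int)) = m from Int.toNat_of_nonneg (by omega)] at hBcol
  have hBrow := edgeRow (m - 1).toNat 0 (m - 1) (by omega)
      (writeCol ans cnt (2 * j) j m.toNat) (cnt + m) (2 * j + m - 1) (j + 1)
  rw [show j + 1 + 0 = j + 1 from by ring,
      show (((m - 1).toNat : Int)) = m - 1 from Int.toNat_of_nonneg (by omega)] at hBrow
  have hBdiag := edgeDiag (m - 2).toNat 0 (m - 2) (by omega)
      (writeRow (writeCol ans cnt (2 * j) j m.toNat) (cnt + m) (2 * j + m - 1) (j + 1)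
        (m - 1).toNat) (cnt + m + (m - 1)) (2 * j + m - 2) (j + m - 2)
  rw [show 2 * j + m - 2 - 0 = 2 * j + m - 2 from by ring,
      show j + m - 2 - 0 = j + m - 2 from by ring,
      show (((m - 2).toNat : Int)) = m - 2 from Int.toNat_of_nonneg (by omega)] at hBdiag
  have hB : ringB (ans, cnt, j) m = (writeDiag (writeRow (writeCol ans cnt (2 * j) j m.toNat)
      (cnt + m) (2 * j + m - 1) (j + 1) (m - 1).toNat) (cnt + m + (m - 1)) (2 * j + m - 2)
      (j + m - 2) (m - 2).toNat, cnt + m + (m - 1) + (m - 2), j + 1) := by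
    simp only [ringB]
    rw [hBcol, hBrow, hBdiag]
  rw [hB]

-- ===== VERDICT (by name: the statement is the Claim_ definition above) =====
theorem solution_spec : Claim_equal_solution := by
  intro n _
  unfold Spec_solution solution solution_alt
  simp only []
  have h := main_rings n.toNat n (Int.self_le_toNat n) 0 1
      ((PySem.List.pyRange 1 (n + 1) 1).map (fun i => List.replicate i.toNat (0 : Int)))
  rw [show (2 : Int) * 0 = 0 by ring] at h
  rw [h, PySem.List.foldl_append_eq_flatten]
  simp
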